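-- pv_equiv track=rewrite | github.com/ThePhiRatio/COS-350-Algorithms | A6/soucyn/BMA.py | lastOccurenceFunction
-- ===== SOURCE A (Python) =====
-- def lastOccurenceFunction(pat):
--     #POST: Creates a dictionary of the last occurence of each letter in the pattern string for the text
--     occur = dict()
--     #create a dict for the alphabet, set all equal to -1
--     for l in pat:
--         occur[l] = -1
--         #if there is an occurence of the letter, set dict entry to the index of last occurence
--         for i in range (len(pat) -1,-1,-1):
--             if l == pat[i]:
--                 occur[l] = i
--     #return the alphabet last occurence dictionary
--     return occur
-- ===== SOURCE B (Python) =====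
-- def lastOccurenceFunction(pat):
--     # Single forward pass: record each character's index the first time it is seen.
--     # (A's descending inner scan ends on the smallest matching index, so its final
--     # value per character is exactly the first-occurrence index.)
--     occur = dict()
--     for i, c in enumerate(pat):
--         if c not in occur:
--             occur[c] = i
--     return occur
-- ===== Notes on version B (the rewrite author's own statement) =====
-- stated objective: faster
-- what changed: Replaced the per-character full backward scan (which ends on the smallest matching index, i.e. the first occurrence) by one forward pass over enumerate(pat) that records each character only the first time it appears.
import Mathlib
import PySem

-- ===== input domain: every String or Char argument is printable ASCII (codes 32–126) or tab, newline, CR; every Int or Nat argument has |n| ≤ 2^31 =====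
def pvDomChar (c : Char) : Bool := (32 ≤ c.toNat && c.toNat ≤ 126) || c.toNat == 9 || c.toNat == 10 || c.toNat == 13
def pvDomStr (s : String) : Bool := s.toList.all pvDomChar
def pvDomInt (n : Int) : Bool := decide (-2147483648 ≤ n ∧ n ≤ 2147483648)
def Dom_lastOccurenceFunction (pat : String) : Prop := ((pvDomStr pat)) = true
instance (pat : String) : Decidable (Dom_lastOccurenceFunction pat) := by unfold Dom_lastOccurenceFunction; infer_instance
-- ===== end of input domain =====

-- B replaces A's per-character backward scan of the whole pattern by a single forward
-- pass recording each character the first time it appears (objective: faster).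
-- (Python's one-character strings l, pat[i] are compared at the Char level — exact.)

-- ===== PORT A =====
-- A: for each character l of pat, set occur[l] = -1, then scan i = len-1 .. 0 and
-- overwrite occur[l] = i on every match (the final write is the smallest match).
def lastOccurenceFunction (pat : String) : List (String × Int) :=
  (pat.toList.foldl
    (fun d l =>
      (PySem.List.pyRange (PySem.Str.len pat - 1) (-1) (-1)).foldl
        (fun d i => if some l == PySem.List.pyGet? pat.toList i then d.insert (String.ofList [l]) i else d)
        (d.insert (String.ofList [l]) (-1)))
    PySem.Dict.empty).items

-- ===== PORT B =====
-- B: one forward pass over enumerate(pat); insert only when the key is absent.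
def lastOccurenceFunction_alt (pat : String) : List (String × Int) :=
  ((PySem.List.enumerate pat.toList 0).foldl
    (fun d p => if d.contains (String.ofList [p.2]) then d else d.insert (String.ofList [p.2]) p.1)
    PySem.Dict.empty).items

-- ===== PRECONDITION & SPEC =====
def Spec_lastOccurenceFunction (pat : String) (out : List (String × Int)) : Prop := out = lastOccurenceFunction_alt pat
instance (pat : String) (out : List (String × Int)) : Decidable (Spec_lastOccurenceFunction pat out) := by unfold Spec_lastOccurenceFunction; infer_instance

-- ===== CLAIM (what is proved, stated in full; the proofs are below) =====
def Claim_equal_lastOccurenceFunction : Prop := ∀ (pat : String), Dom_lastOccurenceFunction pat → Spec_lastOccurenceFunction pat (lastOccurenceFunction pat)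

-- ===== LEMMAS AND PROOFS =====

-- the one-character-string keys A and B use are injective in the character
theorem pvKey_inj {a b : Char} (h : String.ofList [a] = String.ofList [b]) : a = b := by
  have := congrArg String.toList h
  simpa using this

-- re-inserting the value a key already holds changes nothing (items included)
theorem pvInsert_same {d : PySem.Dict String Int} {k : String} {v : Int}
    (hn : d.keys.Nodup) (h : d.get? k = some v) : d.insert k v = d := by
  have hc : d.contains k = true := by
    rw [PySem.Dict.contains_eq_isSome_get?, h]; rfl
  apply PySem.Dict.ext
  rw [PySem.Dict.items_insert_of_contains d v hc]
  conv_rhs => rw [← List.map_id d.items]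
  apply List.map_congr_left
  intro p hp
  obtain ⟨p1, p2⟩ := p
  by_cases hpk : p1 = k
  · have h2 : d.get? p1 = some p2 := PySem.Dict.get?_of_mem_items d hp hn
    rw [hpk, h] at h2
    simp [hpk, Option.some_inj.mp h2]
  · simp [hpk]

-- A's inner backward scan over indices t-1 .. 0: overwrite-on-match ends at the
-- first occurrence inside the prefix cs.take t (and leaves e unchanged if none).
theorem pvInner (cs : List Char) (l : Char) :
    ∀ (t : Nat), t ≤ cs.length → ∀ (e : PySem.Dict String Int),
    (PySem.List.pyRange ((t : Int) - 1) (-1) (-1)).foldl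
        (fun d i => if some l == PySem.List.pyGet? cs i then d.insert (String.ofList [l]) i else d) e
      = if l ∈ cs.take t then e.insert (String.ofList [l]) ((cs.idxOf l : Int)) else e := by
  intro t
  induction t with
  | zero =>
    intro _ e
    rw [PySem.List.pyRange_neg_one_eq_nil (by norm_num)]
    simp
  | succ t ih =>
    intro ht e
    have htl : t < cs.length := by omega
    have h1 : ((t + 1 : Nat) : Int) - 1 = (t : Int) := by push_cast; ring
    rw [h1, PySem.List.pyRange_neg_one_cons (by omega), List.foldl_cons]
    have hget : PySem.List.pyGet? cs (t : Int) = some cs[t] := by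
      rw [PySem.List.pyGet?_natCast, List.getElem?_eq_getElem htl]
    rw [hget]
    by_cases hc : l = cs[t]
    · have hm : l ∈ cs := hc ▸ List.getElem_mem htl
      rw [if_pos (by simp [hc]), ih (by omega)]
      by_cases hmem : l ∈ cs.take t
      · rw [if_pos hmem, PySem.Dict.insert_insert_self,
          if_pos ((List.mem_take_iff_idxOf_lt hm).2
            (by have := (List.mem_take_iff_idxOf_lt hm).1 hmem; omega))]
      · have h5 : l ∈ cs.take (t + 1) := by
          rw [List.take_add_one]
          simp [List.getElem?_eq_getElem htl, ← hc]
        have h6 := (List.mem_take_iff_idxOf_lt hm).1 h5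
        have h7 : ¬ cs.idxOf l < t := fun hh => hmem ((List.mem_take_iff_idxOf_lt hm).2 hh)
        rw [if_neg hmem, if_pos h5]
        congr 1
        omega
    · rw [if_neg (by simp [hc]), ih (by omega)]
      have hiff : (l ∈ cs.take (t + 1)) ↔ (l ∈ cs.take t) := by
        constructor
        · intro h
          rw [List.take_add_one, List.getElem?_eq_getElem htl] at h
          rcases List.mem_append.mp h with h | h
          · exact h
          · exact absurd (by simpa using h) hc
        · intro h
          rw [List.take_add_one, List.getElem?_eq_getElem htl]
          exact List.mem_append_left _ h
      simp only [hiff]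

-- joint invariant: re-inserting each character with a fixed value v equals B's
-- insert-if-absent pass, provided v agrees with the dict on keys already present
-- and with the first-occurrence position (offset s) on absent ones.
theorem pvMain (v : Char → Int) :
    ∀ (p : List Char) (d : PySem.Dict String Int) (s : Int),
      d.keys.Nodup →
      (∀ c ∈ p, d.contains (String.ofList [c]) = true → d.get? (String.ofList [c]) = some (v c)) →
      (∀ c ∈ p, d.contains (String.ofList [c]) = false → v c = s + (p.idxOf c : Int)) →
      p.foldl (fun d l => d.insert (String.ofList [l]) (v l)) d
        = (PySem.List.enumerate p s).foldl
            (fun d q => if d.contains (String.ofList [q.2]) then d else d.insert (String.ofList [q.2]) q.1) d := by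
  intro p
  induction p with
  | nil => intro d s _ _ _; simp [PySem.List.enumerate_nil]
  | cons c rest ih =>
    intro d s hn hin hout
    rw [PySem.List.enumerate_cons, List.foldl_cons, List.foldl_cons]
    by_cases hc : d.contains (String.ofList [c]) = true
    · rw [pvInsert_same hn (hin c (List.mem_cons_self) hc)]
      simp only [hc, if_true]
      apply ih d (s + 1) hn
      · intro c' hc' h'; exact hin c' (List.mem_cons_of_mem c hc') h'
      · intro c' hc' h'
        have hne : c ≠ c' := by
          intro he; rw [← he] at h'; rw [h'] at hc; cases hc
        have := hout c' (List.mem_cons_of_mem c hc') h'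
        rw [List.idxOf_cons_ne rest hne] at this
        rw [this]
        push_cast
        ring
    · have hcf : d.contains (String.ofList [c]) = false := by
        cases h : d.contains (String.ofList [c]) with
        | true => exact absurd h hc
        | false => rfl
      have hvc : v c = s := by
        have := hout c (List.mem_cons_self) hcf
        rw [List.idxOf_cons_self] at this
        simpa using this
      simp only [hcf, if_false, Bool.false_eq_true]
      rw [hvc]
      apply ih (d.insert (String.ofList [c]) s) (s + 1)
        (PySem.Dict.nodup_keys_insert d _ _ hn)
      · intro c' hc' h'
        by_cases he : c' = c
        · subst he
          rw [PySem.Dict.get?_insert_self]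
          rw [hvc]
        · have hne : String.ofList [c'] ≠ String.ofList [c] := fun hk => he (pvKey_inj hk)
          rw [PySem.Dict.get?_insert_of_ne d s hne]
          apply hin c' (List.mem_cons_of_mem c hc')
          rw [PySem.Dict.contains_insert d _ _ s] at h'
          simpa [hne] using h'
      · intro c' hc' h'
        rw [PySem.Dict.contains_insert d _ _ s] at h'
        have h2 := Bool.or_eq_false_iff.mp h'
        have hne : c ≠ c' := by
          intro he
          have : (String.ofList [c'] == String.ofList [c]) = true := by simp [he]
          rw [this] at h'
          simp at h'
        have := hout c' (List.mem_cons_of_mem c hc') h2.2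
        rw [List.idxOf_cons_ne rest hne] at this
        rw [this]
        push_cast
        ring

-- ===== VERDICT (by name: the statement is the Claim_ definition above) =====
theorem lastOccurenceFunction_spec : Claim_equal_lastOccurenceFunction := by
  intro pat _
  show lastOccurenceFunction pat = lastOccurenceFunction_alt pat
  unfold lastOccurenceFunction lastOccurenceFunction_alt
  congr 1
  have hA : pat.toList.foldl
      (fun d l =>
        (PySem.List.pyRange (PySem.Str.len pat - 1) (-1) (-1)).foldl
          (fun d i => if some l == PySem.List.pyGet? pat.toList i then d.insert (String.ofList [l]) i else d)
          (d.insert (String.ofList [l]) (-1)))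
      PySem.Dict.empty
      = pat.toList.foldl
          (fun d l => d.insert (String.ofList [l]) ((pat.toList.idxOf l : Int))) PySem.Dict.empty := by
    apply PySem.List.foldl_congr_mem
    intro d l hl
    have hlen : PySem.Str.len pat - 1 = ((pat.toList.length : Nat) : Int) - 1 := by
      rw [PySem.Str.len_eq]
    rw [hlen]
    have := pvInner pat.toList l pat.toList.length (le_refl _) (d.insert (String.ofList [l]) (-1))
    rw [List.take_length, if_pos hl] at this
    rw [this, PySem.Dict.insert_insert_self]
  rw [hA]
  apply pvMain (fun l => (pat.toList.idxOf l : Int)) pat.toList PySem.Dict.empty 0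
    PySem.Dict.nodup_keys_empty
  · intro c _ h
    rw [PySem.Dict.contains_empty] at h
    cases h
  · intro c _ _
    simp
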